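-- pv_equiv track=rewrite | github.com/wagid-sheikh/simplify_downloader | app/reports/shared/line_items_summary.py | summarize_line_items
-- ===== SOURCE A (Python) =====
-- from collections import Counter, defaultdict
-- from collections.abc import Iterable, Mapping
--
-- def _clean(value: object | None) -> str:
--     if value is None:
--         return ""
--     return str(value).strip()
--
-- def _build_label(item: Mapping[str, object]) -> str:
--     service = _clean(item.get("service_name"))
--     garment = _clean(item.get("garment_name"))
--     if not service and not garment:
--         return ""
--     if service and garment:
--         return f"{service} {garment}"
--     return service or garment
--
-- def _collapse_ranges(numbers: list[int]) -> str:
--     parts: list[str] = []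
--     start = end = numbers[0]
--     for num in numbers[1:]:
--         if num == end + 1:
--             end = num
--         else:
--             parts.append(str(start) if start == end else f"{start}–{end}")
--             start = end = num
--     parts.append(str(start) if start == end else f"{start}–{end}")
--     return ", ".join(parts)
--
-- def summarize_line_items(items: Iterable[Mapping[str, object]]) -> str:
--     label_counts: Counter[str] = Counter()
--     for item in items:
--         label = _build_label(item)
--         if label:
--             label_counts[label] += 1
--
--     numbered: defaultdict[str, set[int]] = defaultdict(set)
--     non_numbered_counts: Counter[str] = Counter()
--
--     for label, count in label_counts.items():
--         tokens = label.split()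
--         if tokens and tokens[-1].isdigit():
--             base_label = " ".join(tokens[:-1]).strip()
--             if base_label:
--                 numbered[base_label].add(int(tokens[-1]))
--                 continue
--         non_numbered_counts[label] += count
--
--     segments: list[str] = []
--     for base_label in sorted(numbered, key=str.lower):
--         nums = sorted(numbered[base_label])
--         segments.append(f"{base_label} {_collapse_ranges(nums)}")
--
--     for label in sorted(non_numbered_counts, key=str.lower):
--         segments.append(f"{label} × {non_numbered_counts[label]}")
--
--     return " | ".join(segments)
-- ===== SOURCE B (Python) =====
-- def _clean(value):
--     if value is None:
--         return ""
--     return str(value).strip()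
--
--
-- def _build_label(item):
--     service = _clean(item.get("service_name"))
--     garment = _clean(item.get("garment_name"))
--     if not service and not garment:
--         return ""
--     if service and garment:
--         return f"{service} {garment}"
--     return service or garment
--
--
-- def _collapse_ranges(numbers):
--     parts = []
--     start = end = numbers[0]
--     for num in numbers[1:]:
--         if num == end + 1:
--             end = num
--         else:
--             parts.append(str(start) if start == end else f"{start}–{end}")
--             start = end = num
--     parts.append(str(start) if start == end else f"{start}–{end}")
--     return ", ".join(parts)
--
--
-- def _split_numbered(label):
--     """(base, number) if the label's last token is a digit-run with a non-empty base, else None."""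
--     tokens = label.split()
--     if tokens and tokens[-1].isdigit():
--         base = " ".join(tokens[:-1]).strip()
--         if base:
--             return base, int(tokens[-1])
--     return None
--
--
-- def summarize_line_items(items):
--     # Pipeline over plain lists: no Counter, no defaultdict-of-sets, no dict at all.
--     labels = [label for label in map(_build_label, items) if label]
--     seen = list(dict.fromkeys(labels))
--     bases = list(dict.fromkeys(s[0] for s in map(_split_numbered, seen) if s))
--     plain = [label for label in seen if _split_numbered(label) is None]
--     segments = [
--         f"{base} {_collapse_ranges(sorted({s[1] for s in map(_split_numbered, seen) if s and s[0] == base}))}"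
--         for base in sorted(bases, key=str.lower)
--     ] + [
--         f"{label} × {labels.count(label)}"
--         for label in sorted(plain, key=str.lower)
--     ]
--     return " | ".join(segments)
-- ===== Notes on version B (the rewrite author's own statement) =====
-- stated objective: alternative
-- what changed: B drops A's Counter and defaultdict-of-sets dict machinery entirely and computes the summary as a pipeline over plain lists: dedup the nonempty labels, split each distinct label once, collect the numbered bases and plain labels by dedup/filter, and obtain each plain label's count by labels.count and each base's numbers by a per-base set comprehension, keeping the identical sorted/collapse output construction.
import Mathlib
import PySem

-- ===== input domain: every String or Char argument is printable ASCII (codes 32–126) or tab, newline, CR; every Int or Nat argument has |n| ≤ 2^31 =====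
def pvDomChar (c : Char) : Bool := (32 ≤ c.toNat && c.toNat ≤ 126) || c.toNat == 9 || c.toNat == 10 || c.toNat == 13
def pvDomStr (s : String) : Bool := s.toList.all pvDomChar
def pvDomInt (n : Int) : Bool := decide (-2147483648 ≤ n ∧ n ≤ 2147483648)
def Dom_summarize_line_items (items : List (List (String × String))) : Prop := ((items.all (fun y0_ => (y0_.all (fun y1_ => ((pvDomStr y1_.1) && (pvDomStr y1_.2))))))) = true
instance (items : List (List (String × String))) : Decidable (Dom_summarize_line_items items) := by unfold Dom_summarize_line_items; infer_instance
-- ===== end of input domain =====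

-- B replaces A's Counter/defaultdict-of-sets dict machinery by a pipeline over plain lists
-- (dedup, filter, per-label count); objective: alternative. Same return value everywhere.

-- ===== shared module helpers (_clean, _build_label, _collapse_ranges of the Python module,
-- used verbatim by both A and B) =====

-- _clean(value): None -> "", else str(value).strip() (values here are strings)
def pvClean (value : Option String) : String :=
  match value with
  | none => ""
  | some v => PySem.Str.strip v

-- _build_label(item)
def pvBuildLabel (item : List (String × String)) : String :=
  let service := pvClean ((PySem.Dict.mk item).get? "service_name")
  let garment := pvClean ((PySem.Dict.mk item).get? "garment_name")
  if service == "" && garment == "" then ""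
  else if !(service == "") && !(garment == "") then service ++ " " ++ garment
  else if !(service == "") then service else garment

-- _collapse_ranges(numbers); Python indexes numbers[0], raising on []: only ever called with a
-- nonempty list (a nonempty set of numbers), the [] case below is unreachable for both callers.
def pvCollapseRanges (numbers : List Int) : String :=
  match numbers with
  | [] => ""
  | n0 :: rest =>
    let step := fun (s : List String × Int × Int) (num : Int) =>
      if num == s.2.2 + 1 then (s.1, s.2.1, num)
      else (s.1 ++ [if s.2.1 == s.2.2 then PySem.Int.toStr s.2.1
                    else PySem.Int.toStr s.2.1 ++ "–" ++ PySem.Int.toStr s.2.2], num, num)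
    let r := rest.foldl step ([], n0, n0)
    PySem.Str.join ", " (r.1 ++ [if r.2.1 == r.2.2 then PySem.Int.toStr r.2.1
                                 else PySem.Int.toStr r.2.1 ++ "–" ++ PySem.Int.toStr r.2.2])

-- ===== PORT A =====
def summarize_line_items (items : List (List (String × String))) : String :=
  let label_counts : PySem.Dict String Int :=
    items.foldl (fun d item =>
      let label := pvBuildLabel item
      if !(label == "") then d.modify label 0 (· + 1) else d) PySem.Dict.empty
  let st : PySem.Dict String (PySem.Set Int) × PySem.Dict String Int :=
    label_counts.items.foldl (fun s lc =>
      let tokens := PySem.Str.split₀ lc.1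
      if !(tokens == []) && PySem.Str.strIsdigit ((PySem.List.pyGet? tokens (-1)).getD "") then
        if !(PySem.Str.strip (PySem.Str.join " " (PySem.List.slice tokens none (some (-1)))) == "") then
          (s.1.modify (PySem.Str.strip (PySem.Str.join " " (PySem.List.slice tokens none (some (-1))))) []
             (fun ns => PySem.Set.add ns ((PySem.Int.ofStr? ((PySem.List.pyGet? tokens (-1)).getD "")).getD 0)),
           s.2)
        else (s.1, s.2.modify lc.1 0 (· + lc.2))
      else (s.1, s.2.modify lc.1 0 (· + lc.2))) (PySem.Dict.empty, PySem.Dict.empty)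
  let segments : List String :=
    (PySem.List.sorted st.1.keys PySem.Str.lower).map (fun base_label =>
      base_label ++ " " ++ pvCollapseRanges (PySem.List.sorted (st.1.getD base_label []) (fun n => n)))
  let segments' : List String :=
    segments ++ (PySem.List.sorted st.2.keys PySem.Str.lower).map (fun label =>
      label ++ " × " ++ PySem.Int.toStr (st.2.getD label 0))
  PySem.Str.join " | " segments'

-- ===== PORT B =====

-- _split_numbered(label) of Source B
def pvSplit (label : String) : Option (String × Int) :=
  let tokens := PySem.Str.split₀ label
  if !(tokens == []) && PySem.Str.strIsdigit ((PySem.List.pyGet? tokens (-1)).getD "") then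
    let base := PySem.Str.strip (PySem.Str.join " " (PySem.List.slice tokens none (some (-1))))
    if !(base == "") then
      some (base, (PySem.Int.ofStr? ((PySem.List.pyGet? tokens (-1)).getD "")).getD 0)
    else none
  else none

def summarize_line_items_alt (items : List (List (String × String))) : String :=
  let labels := (items.map pvBuildLabel).filter (fun label => !(label == ""))
  let seen := PySem.List.dedup labels
  let bases := PySem.List.dedup ((seen.map pvSplit).filterMap (fun s => s.map (·.1)))
  let plain := seen.filter (fun label => pvSplit label == none)
  let segments : List String :=
    (PySem.List.sorted bases PySem.Str.lower).map (fun base =>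
      base ++ " " ++ pvCollapseRanges (PySem.List.sorted
        (PySem.Set.ofList ((seen.map pvSplit).filterMap (fun s =>
          match s with
          | some c => if c.1 == base then some c.2 else none
          | none => none))) (fun n => n)))
    ++ (PySem.List.sorted plain PySem.Str.lower).map (fun label =>
      label ++ " × " ++ PySem.Int.toStr ((labels.count label : Int)))
  PySem.Str.join " | " segments

-- ===== PRECONDITION & SPEC =====
def Spec_summarize_line_items (items : List (List (String × String))) (out : String) : Prop := out = summarize_line_items_alt items
instance (items : List (List (String × String))) (out : String) : Decidable (Spec_summarize_line_items items out) := by unfold Spec_summarize_line_items; infer_instance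

-- ===== CLAIM (what is proved, stated in full; the proofs are below) =====
def Claim_equal_summarize_line_items : Prop := ∀ (items : List (List (String × String))), Dom_summarize_line_items items → Spec_summarize_line_items items (summarize_line_items items)

-- ===== LEMMAS AND PROOFS =====

-- The nonempty labels of the items, in order (= B's 'labels' list).
def pvLabels (items : List (List (String × String))) : List String :=
  (items.map pvBuildLabel).filter (fun l => !(l == ""))

-- Pieces of the per-label classification shared by the analysis of both ports.
def pvBase (label : String) : String :=
  PySem.Str.strip (PySem.Str.join " " (PySem.List.slice (PySem.Str.split₀ label) none (some (-1))))
def pvNum (label : String) : Int :=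
  (PySem.Int.ofStr? ((PySem.List.pyGet? (PySem.Str.split₀ label) (-1)).getD "")).getD 0
def pvIsNum (label : String) : Bool :=
  ((!(PySem.Str.split₀ label == [])) && PySem.Str.strIsdigit ((PySem.List.pyGet? (PySem.Str.split₀ label) (-1)).getD "")) && !(pvBase label == "")

lemma pvSplit_eq (l : String) :
    pvSplit l = if pvIsNum l then some (pvBase l, pvNum l) else none := by
  simp only [pvSplit, pvIsNum, pvBase, pvNum]
  split_ifs <;> simp_all

def pvNumStep (num : PySem.Dict String (PySem.Set Int)) (label : String) :
    PySem.Dict String (PySem.Set Int) :=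
  if pvIsNum label then num.modify (pvBase label) [] (fun ns => PySem.Set.add ns (pvNum label)) else num
def pvCntStep (nn : PySem.Dict String Int) (label : String) (c : Int) : PySem.Dict String Int :=
  if pvIsNum label then nn else nn.modify label 0 (· + c)

-- Named transliterations of A's two loop bodies (definitionally equal to the port's lambdas).
def pvCountA (d : PySem.Dict String Int) (item : List (String × String)) : PySem.Dict String Int :=
  if !(pvBuildLabel item == "") then d.modify (pvBuildLabel item) 0 (· + 1) else d

def pvStepA (s : PySem.Dict String (PySem.Set Int) × PySem.Dict String Int) (lc : String × Int) :
    PySem.Dict String (PySem.Set Int) × PySem.Dict String Int :=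
  if !(PySem.Str.split₀ lc.1 == []) && PySem.Str.strIsdigit ((PySem.List.pyGet? (PySem.Str.split₀ lc.1) (-1)).getD "") then
    if !(PySem.Str.strip (PySem.Str.join " " (PySem.List.slice (PySem.Str.split₀ lc.1) none (some (-1)))) == "") then
      (s.1.modify (PySem.Str.strip (PySem.Str.join " " (PySem.List.slice (PySem.Str.split₀ lc.1) none (some (-1))))) []
         (fun ns => PySem.Set.add ns ((PySem.Int.ofStr? ((PySem.List.pyGet? (PySem.Str.split₀ lc.1) (-1)).getD "")).getD 0)),
       s.2)
    else (s.1, s.2.modify lc.1 0 (· + lc.2))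
  else (s.1, s.2.modify lc.1 0 (· + lc.2))

-- The step of A's second loop splits componentwise into pvNumStep / pvCntStep.
lemma pvStepA_eq (s : PySem.Dict String (PySem.Set Int) × PySem.Dict String Int) (lc : String × Int) :
    pvStepA s lc = (pvNumStep s.1 lc.1, pvCntStep s.2 lc.1 lc.2) := by
  obtain ⟨s1, s2⟩ := s
  obtain ⟨l, c⟩ := lc
  simp only [pvStepA, pvNumStep, pvCntStep, pvIsNum, pvBase, pvNum]
  split_ifs <;> first | rfl | simp_all

-- A's first loop builds exactly the counter of the nonempty labels.
lemma pvFirstLoop (items : List (List (String × String))) :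
    List.foldl pvCountA PySem.Dict.empty items = PySem.Dict.counter (pvLabels items) := by
  have h1 : List.foldl pvCountA PySem.Dict.empty items
      = (items.filter (fun item => !(pvBuildLabel item == ""))).foldl
        (fun (d : PySem.Dict String Int) item => d.modify (pvBuildLabel item) 0 (· + 1)) PySem.Dict.empty :=
    PySem.List.foldl_if_eq_foldl_filter (fun item => !(pvBuildLabel item == ""))
      (fun (d : PySem.Dict String Int) item => d.modify (pvBuildLabel item) 0 (· + 1)) items PySem.Dict.empty
  have h2 : ((items.filter (fun item => !(pvBuildLabel item == ""))).map pvBuildLabel).foldl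
        (fun (d : PySem.Dict String Int) x => d.modify x 0 (· + 1)) PySem.Dict.empty
      = (items.filter (fun item => !(pvBuildLabel item == ""))).foldl
        (fun (d : PySem.Dict String Int) item => d.modify (pvBuildLabel item) 0 (· + 1)) PySem.Dict.empty :=
    List.foldl_map
  have h3 : (items.filter (fun item => !(pvBuildLabel item == ""))).map pvBuildLabel
      = pvLabels items := by
    rw [pvLabels, List.filter_map]
    all_goals rfl
  have h4 : ((items.filter (fun item => !(pvBuildLabel item == ""))).map pvBuildLabel).foldl
        (fun (d : PySem.Dict String Int) x => d.modify x 0 (· + 1)) PySem.Dict.empty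
      = (pvLabels items).foldl (fun (d : PySem.Dict String Int) x => d.modify x 0 (· + 1)) PySem.Dict.empty :=
    congrArg (fun L => List.foldl (fun (d : PySem.Dict String Int) x => d.modify x 0 (· + 1)) PySem.Dict.empty L) h3
  exact h1.trans (h2.symm.trans (h4.trans (PySem.Dict.counter_eq_foldl _).symm))

-- Componentwise split of A's second loop (first-order induction form).
lemma pvASplit : ∀ (ps : List (String × Int)) (s1 : PySem.Dict String (PySem.Set Int)) (s2 : PySem.Dict String Int),
    List.foldl pvStepA (s1, s2) ps
    = (ps.foldl (fun num lc => pvNumStep num lc.1) s1,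
       ps.foldl (fun nn lc => pvCntStep nn lc.1 lc.2) s2)
  | [], _, _ => rfl
  | lc :: t, s1, s2 => by
    rw [List.foldl_cons, List.foldl_cons, List.foldl_cons, pvStepA_eq]
    exact pvASplit t _ _

-- Folding a keyed step over the (key, value) pairs is folding over the keys.
lemma pvMapFoldN (f : String → Int) : ∀ (ls : List String) (d : PySem.Dict String (PySem.Set Int)),
    (ls.map (fun k => (k, f k))).foldl (fun num lc => pvNumStep num lc.1) d = ls.foldl pvNumStep d
  | [], _ => rfl
  | _ :: t, _ => pvMapFoldN f t _

lemma pvMapFoldC (f : String → Int) : ∀ (ls : List String) (d : PySem.Dict String Int),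
    (ls.map (fun k => (k, f k))).foldl (fun nn lc => pvCntStep nn lc.1 lc.2) d
    = ls.foldl (fun nn k => pvCntStep nn k (f k)) d
  | [], _ => rfl
  | _ :: t, _ => pvMapFoldC f t _

-- The numbered-side fold only acts on the numbered labels.
lemma pvNumFold_filter : ∀ (ls : List String) (d : PySem.Dict String (PySem.Set Int)),
    ls.foldl pvNumStep d
    = (ls.filter pvIsNum).foldl
        (fun num l => num.modify (pvBase l) [] (fun ns => PySem.Set.add ns (pvNum l))) d
  | [], _ => rfl
  | l :: t, d => by
    rw [List.foldl_cons, List.filter_cons]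
    by_cases h : pvIsNum l
    · rw [if_pos (by simpa using h), List.foldl_cons]
      have hstep : pvNumStep d l = d.modify (pvBase l) [] (fun ns => PySem.Set.add ns (pvNum l)) := by
        simp [pvNumStep, h]
      rw [hstep]
      exact pvNumFold_filter t _
    · rw [if_neg (by simpa using h)]
      have hstep : pvNumStep d l = d := by simp [pvNumStep, h]
      rw [hstep]
      exact pvNumFold_filter t _

-- The counting-side fold only acts on the non-numbered labels.
lemma pvCntFold_filter (f : String → Int) : ∀ (ls : List String) (d : PySem.Dict String Int),
    ls.foldl (fun nn k => pvCntStep nn k (f k)) d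
    = (ls.filter (fun k => !(pvIsNum k))).foldl (fun nn k => nn.modify k 0 (· + f k)) d
  | [], _ => rfl
  | l :: t, d => by
    rw [List.foldl_cons, List.filter_cons]
    by_cases h : pvIsNum l
    · rw [if_neg (by simp [h])]
      have hstep : pvCntStep d l (f l) = d := by simp [pvCntStep, h]
      rw [hstep]
      exact pvCntFold_filter f t _
    · rw [if_pos (by simp [h]), List.foldl_cons]
      have hstep : pvCntStep d l (f l) = d.modify l 0 (· + f l) := by
        simp [pvCntStep, h]
      rw [hstep]
      exact pvCntFold_filter f t _

-- Rebuilding a dict by count-modifies over fresh distinct keys appends the pairs.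
lemma pvRebuild (f : String → Int) : ∀ (ks : List String) (d : PySem.Dict String Int),
    (∀ k ∈ ks, d.contains k = false) → ks.Nodup →
    (ks.foldl (fun nn k => nn.modify k 0 (· + f k)) d).items
    = d.items ++ ks.map (fun k => (k, 0 + f k))
  | [], d, _, _ => by simp
  | k :: t, d, hfresh, hnd => by
    have hk : d.contains k = false := hfresh k (by simp)
    have hmod : d.modify k 0 (· + f k) = d.insert k (0 + f k) := by
      show d.insert k (d.getD k 0 + f k) = _
      rw [PySem.Dict.getD_of_not_contains _ _ hk]
    simp only [List.foldl_cons, hmod]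
    have hfresh2 : ∀ q ∈ t, (d.insert k (0 + f k)).contains q = false := by
      intro q hq
      rw [PySem.Dict.contains_insert]
      have hne : q ≠ k := by
        simp only [List.nodup_cons] at hnd
        intro hEq
        exact hnd.1 (hEq ▸ hq)
      simp [hne, hfresh q (List.mem_cons_of_mem _ hq)]
    have hnd2 : t.Nodup := by
      simp only [List.nodup_cons] at hnd
      exact hnd.2
    rw [pvRebuild f t _ hfresh2 hnd2]
    rw [PySem.Dict.items_insert_of_not_contains _ _ hk]
    simp

-- B's nums generator at base b, rewritten through pvSplit_eq.
lemma pvNumsB (ls : List String) (b : String) :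
    (ls.map pvSplit).filterMap (fun s =>
        match s with
        | some c => if c.1 == b then some c.2 else none
        | none => none)
    = ((ls.filter pvIsNum).filter (fun l => pvBase l == b)).map pvNum := by
  induction ls with
  | nil => rfl
  | cons l t ih =>
    simp only [List.map_cons, List.filterMap_cons, List.filter_cons]
    rw [pvSplit_eq]
    by_cases hn : pvIsNum l
    · rw [if_pos hn, hn]
      simp only [if_pos]
      rw [List.filter_cons]
      by_cases hb : (pvBase l == b) = true
      · rw [hb, if_pos rfl]
        simp only [if_pos, List.map_cons]
        rw [ih]
      · have : (pvBase l == b) = false := by simpa using hb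
        rw [this]
        simp only [Bool.false_eq_true, if_false]
        exact ih
    · have : pvIsNum l = false := by simpa using hn
      rw [this]
      simp only [Bool.false_eq_true, if_false]
      exact ih

-- B's bases generator, rewritten through pvSplit_eq.
lemma pvBasesB (ls : List String) :
    (ls.map pvSplit).filterMap (fun s => s.map (·.1)) = (ls.filter pvIsNum).map pvBase := by
  induction ls with
  | nil => rfl
  | cons l t ih =>
    simp only [List.map_cons, List.filterMap_cons, List.filter_cons]
    rw [pvSplit_eq]
    by_cases hn : pvIsNum l
    · rw [if_pos hn, hn]
      simp only [if_pos, Option.map_some, List.map_cons]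
      rw [ih]
    · have : pvIsNum l = false := by simpa using hn
      rw [this]
      simp only [Bool.false_eq_true, if_false, Option.map_none]
      exact ih

-- B's plain filter, rewritten through pvSplit_eq.
lemma pvPlainB (ls : List String) :
    ls.filter (fun l => pvSplit l == none) = ls.filter (fun l => !(pvIsNum l)) := by
  apply List.filter_congr
  intro l _
  rw [pvSplit_eq]
  cases _h : pvIsNum l <;> simp

-- getD of the numbered-side fold: the set at base b collects, in order, the numbers of the
-- labels whose base is b.
lemma pvNumFold_getD : ∀ (ls : List String) (d : PySem.Dict String (PySem.Set Int)) (b : String),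
    (ls.foldl (fun num l => num.modify (pvBase l) [] (fun ns => PySem.Set.add ns (pvNum l))) d).getD b []
    = PySem.Set.update (d.getD b []) ((ls.filter (fun l => pvBase l == b)).map pvNum)
  | [], d, b => by simp [PySem.Set.update]
  | l :: t, d, b => by
    simp only [List.foldl_cons, List.filter_cons]
    by_cases hb : pvBase l = b
    · have hbeq : (pvBase l == b) = true := by simpa using hb
      rw [hbeq]
      simp only [if_pos, List.map_cons]
      rw [pvNumFold_getD t _ b, PySem.Dict.getD_modify, if_pos hb.symm, hb,
        PySem.Set.update_cons]
    · have hbeq : ¬ (pvBase l == b) = true := by simpa using hb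
      rw [if_neg hbeq]
      rw [pvNumFold_getD t _ b, PySem.Dict.getD_modify, if_neg (fun h => hb h.symm)]

-- A's rendering of the accumulated pair (defeq to A's tail).
def pvRender (st : PySem.Dict String (PySem.Set Int) × PySem.Dict String Int) : String :=
  PySem.Str.join " | "
    ((PySem.List.sorted st.1.keys PySem.Str.lower).map (fun base_label =>
        base_label ++ " " ++ pvCollapseRanges (PySem.List.sorted (st.1.getD base_label []) (fun n => n)))
      ++ (PySem.List.sorted st.2.keys PySem.Str.lower).map (fun label =>
        label ++ " × " ++ PySem.Int.toStr (st.2.getD label 0)))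

-- ===== VERDICT (by name: the statement is the Claim_ definition above) =====
set_option maxHeartbeats 4000000 in
theorem summarize_line_items_spec : Claim_equal_summarize_line_items := by
  intro items _
  show pvRender (List.foldl pvStepA (PySem.Dict.empty, PySem.Dict.empty)
        (List.foldl pvCountA PySem.Dict.empty items).items)
    = PySem.Str.join " | "
        ((PySem.List.sorted (PySem.List.dedup (((PySem.List.dedup (pvLabels items)).map pvSplit).filterMap
              (fun s => s.map (·.1)))) PySem.Str.lower).map (fun base =>
            base ++ " " ++ pvCollapseRanges (PySem.List.sorted
              (PySem.Set.ofList (((PySem.List.dedup (pvLabels items)).map pvSplit).filterMap (fun s =>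
                match s with
                | some c => if c.1 == base then some c.2 else none
                | none => none))) (fun n => n)))
          ++ (PySem.List.sorted ((PySem.List.dedup (pvLabels items)).filter
                (fun label => pvSplit label == none)) PySem.Str.lower).map (fun label =>
            label ++ " × " ++ PySem.Int.toStr ((pvLabels items).count label : Int)))
  rw [pvFirstLoop, PySem.Dict.items_counter, PySem.List.dedup_eq_ofList]
  set L := pvLabels items
  set S := PySem.Set.ofList L
  rw [pvASplit]
  simp only [pvRender]
  -- numbered side: normalize the dict fold
  have hN : (S.map (fun k => (k, (L.count k : Int)))).foldl
        (fun num lc => pvNumStep num lc.1) PySem.Dict.empty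
      = (S.filter pvIsNum).foldl
          (fun num l => num.modify (pvBase l) [] (fun ns => PySem.Set.add ns (pvNum l)))
          PySem.Dict.empty :=
    (pvMapFoldN _ S PySem.Dict.empty).trans (pvNumFold_filter S PySem.Dict.empty)
  have hKeysN : ((S.map (fun k => (k, (L.count k : Int)))).foldl
        (fun num lc => pvNumStep num lc.1) PySem.Dict.empty).keys
      = PySem.Set.ofList ((S.filter pvIsNum).map pvBase) := by
    rw [hN]
    have h := PySem.Dict.keys_foldl_modify_key (S.filter pvIsNum) pvBase ([] : PySem.Set Int)
      (fun _ l ns => PySem.Set.add ns (pvNum l)) PySem.Dict.empty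
    rw [PySem.Dict.keys_empty, PySem.Set.update_nil_left] at h
    exact h
  have hGetDN : ∀ b, ((S.map (fun k => (k, (L.count k : Int)))).foldl
        (fun num lc => pvNumStep num lc.1) PySem.Dict.empty).getD b []
      = PySem.Set.ofList (((S.filter pvIsNum).filter (fun l => pvBase l == b)).map pvNum) := by
    intro b
    rw [hN, pvNumFold_getD, PySem.Dict.getD_empty, PySem.Set.update_nil_left]
  -- counting side: normalize the dict fold to an items list over fresh keys
  have hC : (S.map (fun k => (k, (L.count k : Int)))).foldl
        (fun nn lc => pvCntStep nn lc.1 lc.2) PySem.Dict.empty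
      = (S.filter (fun k => !(pvIsNum k))).foldl
          (fun nn k => nn.modify k 0 (· + (L.count k : Int))) PySem.Dict.empty :=
    (pvMapFoldC _ S PySem.Dict.empty).trans (pvCntFold_filter _ S PySem.Dict.empty)
  have hPnd : (S.filter (fun k => !(pvIsNum k))).Nodup := (PySem.Set.nodup_ofList L).filter _
  have hItemsC : ((S.map (fun k => (k, (L.count k : Int)))).foldl
        (fun nn lc => pvCntStep nn lc.1 lc.2) PySem.Dict.empty).items
      = (S.filter (fun k => !(pvIsNum k))).map (fun k => (k, 0 + (L.count k : Int))) := by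
    rw [hC, pvRebuild _ _ _ (fun k _ => PySem.Dict.contains_empty k) hPnd]
    rfl
  have hKeysC : ((S.map (fun k => (k, (L.count k : Int)))).foldl
        (fun nn lc => pvCntStep nn lc.1 lc.2) PySem.Dict.empty).keys
      = S.filter (fun k => !(pvIsNum k)) := by
    show ((S.map (fun k => (k, (L.count k : Int)))).foldl
        (fun nn lc => pvCntStep nn lc.1 lc.2) PySem.Dict.empty).items.map Prod.fst = _
    rw [hItemsC, List.map_map]
    simp [Function.comp_def]
  have hGetDC : ∀ l ∈ S.filter (fun k => !(pvIsNum k)),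
      ((S.map (fun k => (k, (L.count k : Int)))).foldl
        (fun nn lc => pvCntStep nn lc.1 lc.2) PySem.Dict.empty).getD l 0
      = (L.count l : Int) := by
    intro l hl
    have hmem : (l, 0 + (L.count l : Int))
        ∈ ((S.map (fun k => (k, (L.count k : Int)))).foldl
          (fun nn lc => pvCntStep nn lc.1 lc.2) PySem.Dict.empty).items := by
      rw [hItemsC]
      exact List.mem_map_of_mem hl
    have hnd : ((S.map (fun k => (k, (L.count k : Int)))).foldl
        (fun nn lc => pvCntStep nn lc.1 lc.2) PySem.Dict.empty).keys.Nodup := by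
      rw [hKeysC]; exact hPnd
    rw [PySem.Dict.getD_of_mem_items _ hmem hnd 0, zero_add]
  -- assemble the two segment lists
  have hBases : PySem.List.dedup ((S.map pvSplit).filterMap (fun s => s.map (·.1)))
      = PySem.Set.ofList ((S.filter pvIsNum).map pvBase) := by
    rw [pvBasesB, PySem.List.dedup_eq_ofList]
  have hSegN : (PySem.List.sorted
        ((S.map (fun k => (k, (L.count k : Int)))).foldl
          (fun num lc => pvNumStep num lc.1) PySem.Dict.empty).keys PySem.Str.lower).map
        (fun base_label => base_label ++ " " ++ pvCollapseRanges (PySem.List.sorted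
          (((S.map (fun k => (k, (L.count k : Int)))).foldl
            (fun num lc => pvNumStep num lc.1) PySem.Dict.empty).getD base_label [])
          (fun n => n)))
      = (PySem.List.sorted (PySem.List.dedup ((S.map pvSplit).filterMap
            (fun s => s.map (·.1)))) PySem.Str.lower).map (fun base =>
          base ++ " " ++ pvCollapseRanges (PySem.List.sorted
            (PySem.Set.ofList ((S.map pvSplit).filterMap (fun s =>
              match s with
              | some c => if c.1 == base then some c.2 else none
              | none => none))) (fun n => n))) := by
    rw [hBases, hKeysN]
    apply List.map_congr_left
    intro b _
    rw [hGetDN b, pvNumsB]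
  have hSegC : (PySem.List.sorted
        ((S.map (fun k => (k, (L.count k : Int)))).foldl
          (fun nn lc => pvCntStep nn lc.1 lc.2) PySem.Dict.empty).keys PySem.Str.lower).map
        (fun label => label ++ " × " ++ PySem.Int.toStr
          (((S.map (fun k => (k, (L.count k : Int)))).foldl
            (fun nn lc => pvCntStep nn lc.1 lc.2) PySem.Dict.empty).getD label 0))
      = (PySem.List.sorted (S.filter (fun label => pvSplit label == none)) PySem.Str.lower).map
          (fun label => label ++ " × " ++ PySem.Int.toStr ((L.count label : Int))) := by
    rw [pvPlainB, hKeysC]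
    apply List.map_congr_left
    intro l hl
    have hl' : l ∈ S.filter (fun k => !(pvIsNum k)) := ((PySem.List.mem_sorted _ _ _ _)).mp hl
    rw [hGetDC l hl']
  rw [hSegN, hSegC]
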